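-- pv_equiv track=rewrite | github.com/mandy1eigh007/resume_workshop | app.py | suggest_transferable_skills_from_text
-- ===== SOURCE A (Python) =====
-- from typing import List, Dict, Any, Optional
--
-- SKILL_CANON = [
--     "Problem-solving","Critical thinking","Attention to detail","Time management",
--     "Teamwork & collaboration","Adaptability & willingness to learn","Safety awareness",
--     "Customer service","Leadership","Reading blueprints & specs",
--     "Hand & power tools","Materials handling (wood/concrete/metal)","Operating machinery",
--     "Trades math & measurement","Regulatory compliance","Physical stamina & dexterity"
-- ]
--
-- TRANSFERABLE_KEYWORDS = {
--     "problem":"Problem-solving","solve":"Problem-solving","troubleshoot":"Problem-solving",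
--     "analyz":"Critical thinking","priorit":"Time management","deadline":"Time management",
--     "detail":"Attention to detail","team":"Teamwork & collaboration","collabor":"Teamwork & collaboration",
--     "adapt":"Adaptability & willingness to learn","learn":"Adaptability & willingness to learn",
--     "safety":"Safety awareness","osha":"Safety awareness","customer":"Customer service",
--     "lead":"Leadership","blueprint":"Reading blueprints & specs","spec":"Reading blueprints & specs",
--     "tool":"Hand & power tools","drill":"Hand & power tools","saw":"Hand & power tools",
--     "forklift":"Operating machinery","material":"Materials handling (wood/concrete/metal)",
--     "machin":"Operating machinery","math":"Trades math & measurement","measure":"Trades math & measurement",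
--     "code":"Regulatory compliance","permit":"Regulatory compliance","compliance":"Regulatory compliance",
--     "stamina":"Physical stamina & dexterity","lift":"Physical stamina & dexterity",
-- }
--
-- def suggest_transferable_skills_from_text(text: str)->List[str]:
--     if not text: return []
--     hits={}
--     low=text.lower()
--     for kw, skill in TRANSFERABLE_KEYWORDS.items():
--         if kw in low: hits[skill]=hits.get(skill,0)+1
--     ordered=[s for s,_ in sorted(hits.items(), key=lambda kv: -kv[1])]
--     canon=[s for s in SKILL_CANON if s in ordered]
--     return canon[:8]
-- ===== SOURCE B (Python) =====
-- from typing import List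
--
-- # Static reverse table: canonical skill -> its trigger keywords (space-separated),
-- # in SKILL_CANON order.
-- SKILL_KEYWORDS = [
--     ("Problem-solving", "problem solve troubleshoot"),
--     ("Critical thinking", "analyz"),
--     ("Attention to detail", "detail"),
--     ("Time management", "priorit deadline"),
--     ("Teamwork & collaboration", "team collabor"),
--     ("Adaptability & willingness to learn", "adapt learn"),
--     ("Safety awareness", "safety osha"),
--     ("Customer service", "customer"),
--     ("Leadership", "lead"),
--     ("Reading blueprints & specs", "blueprint spec"),
--     ("Hand & power tools", "tool drill saw"),
--     ("Materials handling (wood/concrete/metal)", "material"),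
--     ("Operating machinery", "forklift machin"),
--     ("Trades math & measurement", "math measure"),
--     ("Regulatory compliance", "code permit compliance"),
--     ("Physical stamina & dexterity", "stamina lift"),
-- ]
--
-- def suggest_transferable_skills_from_text(text: str) -> List[str]:
--     if not text:
--         return []
--     low = text.lower()
--     out = []
--     for skill, kws in SKILL_KEYWORDS:
--         if any(kw in low for kw in kws.split()):
--             out.append(skill)
--             if len(out) == 8:
--                 break
--     return out
-- ===== Notes on version B (the rewrite author's own statement) =====
-- stated objective: simpler
-- what changed: Replaces the keyword->skill dict scan, the hit-count dict, the sort by count and the membership filter over SKILL_CANON with a static skill->keywords reverse table walked once in canonical order, appending a skill when any of its keywords occurs in the lowered text and breaking at 8.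
import Mathlib
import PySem

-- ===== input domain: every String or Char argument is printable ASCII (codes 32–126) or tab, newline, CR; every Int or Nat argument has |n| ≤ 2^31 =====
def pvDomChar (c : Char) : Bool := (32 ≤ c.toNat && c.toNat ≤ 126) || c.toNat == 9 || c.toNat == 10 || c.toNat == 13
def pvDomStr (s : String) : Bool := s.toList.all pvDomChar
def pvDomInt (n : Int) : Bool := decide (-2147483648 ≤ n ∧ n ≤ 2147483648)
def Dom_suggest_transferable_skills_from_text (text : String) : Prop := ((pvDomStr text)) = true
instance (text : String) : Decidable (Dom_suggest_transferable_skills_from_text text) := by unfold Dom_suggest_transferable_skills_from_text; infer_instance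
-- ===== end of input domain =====

-- B replaces A's keyword→skill dict scan + hit-count dict + sort-by-count + membership
-- filter by a static skill→keywords reverse table walked once in output order with an
-- early break at 8 (simpler: one loop, no dict, no sort).

-- ===== PORT A =====
def pvSKILL_CANON : List String :=
  ["Problem-solving","Critical thinking","Attention to detail","Time management",
   "Teamwork & collaboration","Adaptability & willingness to learn","Safety awareness",
   "Customer service","Leadership","Reading blueprints & specs",
   "Hand & power tools","Materials handling (wood/concrete/metal)","Operating machinery",
   "Trades math & measurement","Regulatory compliance","Physical stamina & dexterity"]

-- TRANSFERABLE_KEYWORDS as an association list (dict literal with distinct keys: insertion order)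
def pvKW : List (String × String) :=
  [("problem","Problem-solving"),("solve","Problem-solving"),("troubleshoot","Problem-solving"),
   ("analyz","Critical thinking"),("priorit","Time management"),("deadline","Time management"),
   ("detail","Attention to detail"),("team","Teamwork & collaboration"),("collabor","Teamwork & collaboration"),
   ("adapt","Adaptability & willingness to learn"),("learn","Adaptability & willingness to learn"),
   ("safety","Safety awareness"),("osha","Safety awareness"),("customer","Customer service"),
   ("lead","Leadership"),("blueprint","Reading blueprints & specs"),("spec","Reading blueprints & specs"),
   ("tool","Hand & power tools"),("drill","Hand & power tools"),("saw","Hand & power tools"),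
   ("forklift","Operating machinery"),("material","Materials handling (wood/concrete/metal)"),
   ("machin","Operating machinery"),("math","Trades math & measurement"),("measure","Trades math & measurement"),
   ("code","Regulatory compliance"),("permit","Regulatory compliance"),("compliance","Regulatory compliance"),
   ("stamina","Physical stamina & dexterity"),("lift","Physical stamina & dexterity")]

def suggest_transferable_skills_from_text (text : String) : List String :=
  if text = "" then []
  else
    let low := PySem.Str.lower text
    let hits : PySem.Dict String Int :=
      pvKW.foldl (fun d p =>
        if PySem.Str.isIn p.1 low then d.insert p.2 (d.getD p.2 0 + 1) else d) PySem.Dict.empty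
    let ordered : List String :=
      (PySem.List.sorted hits.items (fun kv => -kv.2) false).map (fun kv => kv.1)
    let canon := pvSKILL_CANON.filter (fun s => ordered.contains s)
    canon.take 8

-- ===== PORT B =====
-- static reverse table: canonical skill → its trigger keywords (space-separated), in canon order
def pvSKILL_KEYWORDS : List (String × String) :=
  [("Problem-solving", "problem solve troubleshoot"),
   ("Critical thinking", "analyz"),
   ("Attention to detail", "detail"),
   ("Time management", "priorit deadline"),
   ("Teamwork & collaboration", "team collabor"),
   ("Adaptability & willingness to learn", "adapt learn"),
   ("Safety awareness", "safety osha"),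
   ("Customer service", "customer"),
   ("Leadership", "lead"),
   ("Reading blueprints & specs", "blueprint spec"),
   ("Hand & power tools", "tool drill saw"),
   ("Materials handling (wood/concrete/metal)", "material"),
   ("Operating machinery", "forklift machin"),
   ("Trades math & measurement", "math measure"),
   ("Regulatory compliance", "code permit compliance"),
   ("Physical stamina & dexterity", "stamina lift")]

-- the for-loop with its early `break` once 8 skills are collected
def pvAltLoop (low : String) : List (String × String) → List String → List String
  | [], out => out
  | p :: rest, out =>
    if (PySem.Str.split₀ p.2).any (fun kw => PySem.Str.isIn kw low) then
      if (out ++ [p.1]).length = 8 then out ++ [p.1]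
      else pvAltLoop low rest (out ++ [p.1])
    else pvAltLoop low rest out

def suggest_transferable_skills_from_text_alt (text : String) : List String :=
  if text = "" then []
  else pvAltLoop (PySem.Str.lower text) pvSKILL_KEYWORDS []

-- ===== PRECONDITION & SPEC =====
def Spec_suggest_transferable_skills_from_text (text : String) (out : List String) : Prop := out = suggest_transferable_skills_from_text_alt text
instance (text : String) (out : List String) : Decidable (Spec_suggest_transferable_skills_from_text text out) := by unfold Spec_suggest_transferable_skills_from_text; infer_instance

-- ===== CLAIM (what is proved, stated in full; the proofs are below) =====
def Claim_equal_suggest_transferable_skills_from_text : Prop := ∀ (text : String), Dom_suggest_transferable_skills_from_text text → Spec_suggest_transferable_skills_from_text text (suggest_transferable_skills_from_text text)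

-- ===== LEMMAS AND PROOFS =====

-- keys of A's conditional-insert counting fold
theorem pv_mem_keys_hits (c : String → Bool) :
    ∀ (l : List (String × String)) (d : PySem.Dict String Int) (s : String),
      s ∈ (l.foldl (fun d p => if c p.1 then d.insert p.2 (d.getD p.2 0 + 1) else d) d).keys ↔
        s ∈ d.keys ∨ ∃ p ∈ l, p.2 = s ∧ c p.1 := by
  intro l
  induction l with
  | nil => simp
  | cons q t ih =>
    intro d s
    simp only [List.foldl_cons]
    by_cases hq : c q.1
    · simp only [hq, if_pos, ih, PySem.Dict.mem_keys_insert, List.mem_cons]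
      constructor
      · rintro (⟨h | h⟩ | h)
        · exact Or.inr ⟨q, Or.inl rfl, h.symm, hq⟩
        · exact Or.inl h
        · rcases h with ⟨p, hp, h1, h2⟩; exact Or.inr ⟨p, Or.inr hp, h1, h2⟩
      · rintro (h | ⟨p, hp | hp, h1, h2⟩)
        · exact Or.inl (Or.inr h)
        · subst hp; exact Or.inl (Or.inl h1.symm)
        · exact Or.inr ⟨p, hp, h1, h2⟩
    · simp only [hq, if_neg, Bool.false_eq_true, not_false_iff, ih, List.mem_cons]
      constructor
      · rintro (h | ⟨p, hp, h1, h2⟩)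
        · exact Or.inl h
        · exact Or.inr ⟨p, Or.inr hp, h1, h2⟩
      · rintro (h | ⟨p, hp | hp, h1, h2⟩)
        · exact Or.inl h
        · subst hp; simp [hq] at h2
        · exact Or.inr ⟨p, hp, h1, h2⟩

-- A's "skill occurs in the sorted hits" test, characterised over pvKW
theorem pv_A_test_iff (low s : String) :
    ((PySem.List.sorted
        ((pvKW.foldl (fun d p =>
            if PySem.Str.isIn p.1 low then d.insert p.2 (d.getD p.2 0 + 1) else d)
          (PySem.Dict.empty : PySem.Dict String Int)).items) (fun kv => -kv.2) false).map (fun kv => kv.1)).contains s = true ↔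
      ∃ p ∈ pvKW, p.2 = s ∧ PySem.Str.isIn p.1 low = true := by
  rw [List.contains_iff_mem]
  have hkeys : ∀ (d : PySem.Dict String Int),
      (s ∈ (PySem.List.sorted d.items (fun kv : String × Int => -kv.2) false).map (fun kv => kv.1)) ↔
        s ∈ d.keys := by
    intro d
    simp only [List.mem_map, PySem.Dict.keys]
    constructor
    · rintro ⟨kv, hkv, hfst⟩
      exact ⟨kv, (PySem.List.mem_sorted _ _ _ _).mp hkv, hfst⟩
    · rintro ⟨kv, hkv, hfst⟩
      exact ⟨kv, (PySem.List.mem_sorted _ _ _ _).mpr hkv, hfst⟩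
  rw [hkeys, pv_mem_keys_hits (fun kw => PySem.Str.isIn kw low) pvKW PySem.Dict.empty s]
  simp [PySem.Dict.keys_empty]

-- B's break-at-8 loop computes take 8 of the filtered table's skills
theorem pv_altLoop_eq (low : String) :
    ∀ (l : List (String × String)) (acc : List String), acc.length < 8 →
      pvAltLoop low l acc
        = (acc ++ (l.filter (fun p => (PySem.Str.split₀ p.2).any (fun kw => PySem.Str.isIn kw low))).map Prod.fst).take 8 := by
  intro l
  induction l with
  | nil =>
    intro acc h
    simp [pvAltLoop, List.take_of_length_le (le_of_lt h)]
  | cons p rest ih =>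
    intro acc h
    by_cases hp : (PySem.Str.split₀ p.2).any (fun kw => PySem.Str.isIn kw low)
    · simp only [pvAltLoop, if_pos hp]
      by_cases h8 : (acc ++ [p.1]).length = 8
      · rw [if_pos h8]
        simp only [List.filter_cons, hp, if_pos, List.map_cons]
        rw [show acc ++ p.1 :: (List.filter (fun p => (PySem.Str.split₀ p.2).any (fun kw => PySem.Str.isIn kw low)) rest).map Prod.fst = (acc ++ [p.1]) ++ (List.filter (fun p => (PySem.Str.split₀ p.2).any (fun kw => PySem.Str.isIn kw low)) rest).map Prod.fst by simp, List.take_append_of_le_length (by omega), List.take_of_length_le (by omega)]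
      · rw [if_neg h8]
        have hlt : (acc ++ [p.1]).length < 8 := by
          simp only [List.length_append, List.length_cons, List.length_nil] at h8 ⊢; omega
        rw [ih (acc ++ [p.1]) hlt]
        simp only [List.filter_cons, hp, if_pos, List.map_cons, List.append_assoc, List.singleton_append]
    · simp only [pvAltLoop, if_neg hp]
      rw [ih acc h]
      simp only [List.filter_cons]
      rw [if_neg hp]

-- filter commutes with projecting the skill when the predicate agrees pointwise
theorem pv_filter_map_fst (P : String × String → Bool) (Q : String → Bool) :
    ∀ (l : List (String × String)), (∀ p ∈ l, P p = Q p.1) →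
      (l.filter P).map Prod.fst = (l.map Prod.fst).filter Q := by
  intro l
  induction l with
  | nil => intro _; rfl
  | cons p rest ih =>
    intro hpt
    have hp := hpt p (List.mem_cons_self ..)
    by_cases h : P p
    · have h' : Q p.1 = true := hp ▸ h
      simp only [List.filter_cons, h, h', if_pos, List.map_cons]
      rw [ih (fun q hq => hpt q (List.mem_cons_of_mem _ hq))]
    · have h' : Q p.1 = false := by rw [← hp]; exact Bool.eq_false_iff.mpr h
      simp only [List.filter_cons, Bool.eq_false_iff.mpr h, h', Bool.false_eq_true, if_neg, List.map_cons, not_false_iff]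
      exact ih (fun q hq => hpt q (List.mem_cons_of_mem _ hq))

-- pointwise: B's split-keyword test equals A's sorted-hits membership test, on each table row
-- the table with each keyword string already split (proof-side only)
def pvTableSplit : List (String × List String) :=
  [("Problem-solving", ["problem","solve","troubleshoot"]),
   ("Critical thinking", ["analyz"]),
   ("Attention to detail", ["detail"]),
   ("Time management", ["priorit","deadline"]),
   ("Teamwork & collaboration", ["team","collabor"]),
   ("Adaptability & willingness to learn", ["adapt","learn"]),
   ("Safety awareness", ["safety","osha"]),
   ("Customer service", ["customer"]),
   ("Leadership", ["lead"]),
   ("Reading blueprints & specs", ["blueprint","spec"]),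
   ("Hand & power tools", ["tool","drill","saw"]),
   ("Materials handling (wood/concrete/metal)", ["material"]),
   ("Operating machinery", ["forklift","machin"]),
   ("Trades math & measurement", ["math","measure"]),
   ("Regulatory compliance", ["code","permit","compliance"]),
   ("Physical stamina & dexterity", ["stamina","lift"])]

theorem pv_point (low : String) :
    ∀ p ∈ pvSKILL_KEYWORDS,
      ((PySem.Str.split₀ p.2).any (fun kw => PySem.Str.isIn kw low))
        = ((PySem.List.sorted
            ((pvKW.foldl (fun d p =>
                if PySem.Str.isIn p.1 low then d.insert p.2 (d.getD p.2 0 + 1) else d)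
              (PySem.Dict.empty : PySem.Dict String Int)).items) (fun kv => -kv.2) false).map (fun kv => kv.1)).contains p.1 := by
  have htable : pvSKILL_KEYWORDS.map (fun p => (p.1, PySem.Str.split₀ p.2)) = pvTableSplit := by decide
  intro p hp
  have hq : (p.1, PySem.Str.split₀ p.2) ∈ pvTableSplit := htable ▸ List.mem_map_of_mem hp
  rw [Bool.eq_iff_iff, List.any_eq_true, pv_A_test_iff low p.1]
  revert hq
  generalize PySem.Str.split₀ p.2 = ks
  generalize p.1 = s
  intro hq
  fin_cases hq <;> simp [pvKW]

-- ===== VERDICT (by name: the statement is the Claim_ definition above) =====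
theorem suggest_transferable_skills_from_text_spec : Claim_equal_suggest_transferable_skills_from_text := by
  intro text _
  unfold Spec_suggest_transferable_skills_from_text
  unfold suggest_transferable_skills_from_text suggest_transferable_skills_from_text_alt
  by_cases ht : text = ""
  · simp [ht]
  · rw [if_neg ht, if_neg ht]
    rw [pv_altLoop_eq (PySem.Str.lower text) pvSKILL_KEYWORDS [] (by simp)]
    rw [pv_filter_map_fst _ _ pvSKILL_KEYWORDS (pv_point (PySem.Str.lower text))]
    simp only [List.nil_append]
    rw [show pvSKILL_KEYWORDS.map Prod.fst = pvSKILL_CANON from by decide]
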